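-- pv_equiv track=rewrite | github.com/DanieSimonlLowe/SENG401_ass1_reasurcher | Fork.py | parse_diff
-- ===== SOURCE A (Python) =====
-- def parse_diff(diff_text):
--     files_and_functions = {}
--     current_file = None
--     for line in diff_text.split('\n'):
--         # Check if the line indicates a file change
--         if line.startswith('diff --git'):
--             # Extract the file name from the diff --git line
--             parts = line.split(' ')
--             if len(parts) >= 3:
--                 current_file = parts[2][2:]  # Remove the 'b/' prefix
--                 if current_file not in files_and_functions:
--                     files_and_functions[current_file] = set()
--         # Check if the line indicates a function change in the hunk header
--         elif line.startswith('@@') and 'def ' in line: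
--             # Extract the function name
--             function_name = line[line.index('def '):].split('(')[0].replace('def ', '').strip()
--             if current_file:
--                 files_and_functions[current_file].add(function_name)
--
--     return files_and_functions
-- ===== SOURCE B (Python) =====
-- def _fn_name(line):
--     return line[line.index('def '):].split('(')[0].replace('def ', '').strip()
--
--
-- def parse_diff(diff_text):
--     # Pass 1: cut the diff into blocks, each starting at a 'diff --git' line
--     # (the first block holds whatever precedes the first such line).
--     blocks = []
--     cur = []
--     for line in diff_text.split('\n'):
--         if line.startswith('diff --git'):
--             blocks.append(cur)
--             cur = [line]
--         else:
--             cur.append(line)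
--     blocks.append(cur)
--     # Pass 2: walk the blocks, tracking the current file name across blocks
--     # whose header is malformed.
--     files = {}
--     current = None
--     for block in blocks:
--         body = block
--         if block and block[0].startswith('diff --git'):
--             parts = block[0].split(' ')
--             if len(parts) >= 3:
--                 current = parts[2][2:]
--                 if current not in files:
--                     files[current] = set()
--             body = block[1:]
--         if current:
--             for line in body:
--                 if line.startswith('@@') and 'def ' in line:
--                     files[current].add(_fn_name(line))
--     return files
-- ===== Notes on version B (the rewrite author's own statement) =====
-- stated objective: alternative
-- what changed: B replaces A's single line loop with interleaved state updates by a two-pass decomposition: first cut the diff into header-delimited blocks, then process each block (parse its filename from the header, then scan only the block's body lines for def-hunks), carrying the current file name across blocks with malformed headers.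
import Mathlib
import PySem

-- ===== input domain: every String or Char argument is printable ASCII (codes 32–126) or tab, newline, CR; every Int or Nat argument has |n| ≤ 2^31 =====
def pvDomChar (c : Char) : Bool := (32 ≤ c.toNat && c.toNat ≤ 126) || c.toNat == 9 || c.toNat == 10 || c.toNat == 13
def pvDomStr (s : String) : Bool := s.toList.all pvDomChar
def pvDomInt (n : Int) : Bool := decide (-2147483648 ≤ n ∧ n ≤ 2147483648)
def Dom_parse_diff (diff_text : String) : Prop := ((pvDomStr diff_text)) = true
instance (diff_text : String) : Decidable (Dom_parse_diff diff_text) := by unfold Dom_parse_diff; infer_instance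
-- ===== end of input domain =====

-- B re-groups the diff into header-delimited blocks first and then scans each block's
-- body (two simple passes, a different decomposition); same return value as A.

-- ===== PORT A =====
-- Python truthiness of `current_file` (None or a string): true iff some non-empty string
def pvTruthy (c : Option String) : Bool := c.getD "" != ""

-- state of A's single loop: (files_and_functions, current_file)
def pvStA : Type := PySem.Dict String (PySem.Set String) × Option String

-- one iteration of A's `for line in diff_text.split('\n')`
def pvStepA (st : pvStA) (line : String) : pvStA :=
  if PySem.Str.startswith line "diff --git" then
    let parts := (PySem.Str.split? line " ").getD []
    if 3 ≤ parts.length then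
      let cf := PySem.Str.slice (PySem.List.pyGetD parts 2 "") (some 2) none
      ((if st.1.contains cf then st.1 else st.1.insert cf PySem.Set.empty), some cf)
    else st
  else if PySem.Str.startswith line "@@" && PySem.Str.isIn "def " line then
    let fn := PySem.Str.strip (PySem.Str.replace
      (PySem.List.pyGetD ((PySem.Str.split?
        (PySem.Str.slice line (some (PySem.Str.find line "def ")) none) "(").getD []) 0 "")
      "def " "")
    if pvTruthy st.2 then
      (st.1.modify (st.2.getD "") PySem.Set.empty (fun s => PySem.Set.add s fn), st.2)
    else st
  else st

def parse_diff (diff_text : String) : List (String × List String) :=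
  ((((PySem.Str.split? diff_text "\n").getD []).foldl pvStepA
      (PySem.Dict.empty, none)).1).items

-- ===== PORT B =====
-- Source B helper _fn_name
def pvFnName (line : String) : String :=
  PySem.Str.strip (PySem.Str.replace
    (PySem.List.pyGetD ((PySem.Str.split?
      (PySem.Str.slice line (some (PySem.Str.find line "def ")) none) "(").getD []) 0 "")
    "def " "")

-- pass 1 of Source B: cut the lines into blocks at each 'diff --git' line
def pvBuildStep (st : List (List String) × List String) (line : String) :
    List (List String) × List String :=
  if PySem.Str.startswith line "diff --git" then (st.1 ++ [st.2], [line])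
  else (st.1, st.2 ++ [line])

-- Source B's inner `for line in body` loop
def pvInner (cf : String) (d : PySem.Dict String (PySem.Set String)) (body : List String) :
    PySem.Dict String (PySem.Set String) :=
  body.foldl (fun dd line =>
    if PySem.Str.startswith line "@@" && PySem.Str.isIn "def " line then
      dd.modify cf PySem.Set.empty (fun s => PySem.Set.add s (pvFnName line))
    else dd) d

-- pass 2 of Source B: one block of `for block in blocks` — header handling, then the body scan
def pvHdrStep (st : pvStA) (block : List String) :
    PySem.Dict String (PySem.Set String) × Option String × List String :=
  match block with
  | [] => (st.1, st.2, ([] : List String))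
  | h :: t =>
    if PySem.Str.startswith h "diff --git" then
      let parts := (PySem.Str.split? h " ").getD []
      if 3 ≤ parts.length then
        let cf := PySem.Str.slice (PySem.List.pyGetD parts 2 "") (some 2) none
        ((if st.1.contains cf then st.1 else st.1.insert cf PySem.Set.empty), some cf, t)
      else (st.1, st.2, t)
    else (st.1, st.2, block)

def pvBlockStep (st : pvStA) (block : List String) : pvStA :=
  let hdr := pvHdrStep st block
  if pvTruthy hdr.2.1 then (pvInner (hdr.2.1.getD "") hdr.1 hdr.2.2, hdr.2.1)
  else (hdr.1, hdr.2.1)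

def parse_diff_alt (diff_text : String) : List (String × List String) :=
  let lines := (PySem.Str.split? diff_text "\n").getD []
  let r := lines.foldl pvBuildStep ([], [])
  (((r.1 ++ [r.2]).foldl pvBlockStep (PySem.Dict.empty, none)).1).items

-- ===== PRECONDITION & SPEC =====
def Spec_parse_diff (diff_text : String) (out : List (String × List String)) : Prop := out = parse_diff_alt diff_text
instance (diff_text : String) (out : List (String × List String)) : Decidable (Spec_parse_diff diff_text out) := by unfold Spec_parse_diff; infer_instance

-- ===== CLAIM (what is proved, stated in full; the proofs are below) =====
def Claim_equal_parse_diff : Prop := ∀ (diff_text : String), Dom_parse_diff diff_text → Spec_parse_diff diff_text (parse_diff diff_text)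

-- ===== LEMMAS AND PROOFS =====

-- "no line after the first one is a 'diff --git' header" — true of every block pass 1 builds
def pvGB (b : List String) : Prop :=
  ∀ l ∈ b.drop 1, PySem.Str.startswith l "diff --git" = false

theorem pvStepA_nonhdr (d : PySem.Dict String (PySem.Set String)) (c : Option String)
    (l : String) (h : PySem.Str.startswith l "diff --git" = false) :
    pvStepA (d, c) l =
      ((if pvTruthy c then
          (if PySem.Str.startswith l "@@" && PySem.Str.isIn "def " l then
            d.modify (c.getD "") PySem.Set.empty (fun s => PySem.Set.add s (pvFnName l))
          else d)
        else d), c) := by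
  cases hq : (PySem.Str.startswith l "@@" && PySem.Str.isIn "def " l) with
  | true =>
    cases ht : pvTruthy c with
    | true =>
      simp only [pvStepA, pvFnName, h, hq, ht, Bool.false_eq_true, if_false, if_true]
    | false =>
      simp only [pvStepA, h, hq, ht, Bool.false_eq_true, if_false, if_true]
  | false =>
    cases ht : pvTruthy c with
    | true =>
      simp only [pvStepA, h, hq, ht, Bool.false_eq_true, if_false, if_true]
    | false =>
      simp only [pvStepA, h, hq, ht, Bool.false_eq_true, if_false]

theorem pvBodyScan (body : List String) (d : PySem.Dict String (PySem.Set String))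
    (c : Option String)
    (h : ∀ l ∈ body, PySem.Str.startswith l "diff --git" = false) :
    body.foldl pvStepA (d, c) =
      ((if pvTruthy c then pvInner (c.getD "") d body else d), c) := by
  induction body generalizing d with
  | nil =>
    cases ht : pvTruthy c with
    | true => simp only [List.foldl_nil, if_true]; rfl
    | false => simp only [List.foldl_nil, Bool.false_eq_true, if_false]
  | cons l t ih =>
    have hl := h l (by simp)
    have ht' : ∀ x ∈ t, PySem.Str.startswith x "diff --git" = false :=
      fun x hx => h x (by simp [hx])
    rw [List.foldl_cons, pvStepA_nonhdr d c l hl]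
    cases ht : pvTruthy c with
    | true =>
      simp only [if_true]
      rw [ih _ ht']
      simp only [ht, if_true, pvInner, List.foldl_cons]
    | false =>
      simp only [Bool.false_eq_true, if_false]
      rw [ih _ ht']
      simp only [ht, Bool.false_eq_true, if_false]

theorem pvBlockStep_eq (b : List String) (st : pvStA) (hGB : pvGB b) :
    pvBlockStep st b = b.foldl pvStepA st := by
  obtain ⟨d, c⟩ := st
  cases b with
  | nil =>
    rw [List.foldl_nil]
    cases ht : pvTruthy c with
    | true => simp only [pvBlockStep, pvHdrStep, ht, if_true]; rfl
    | false => simp only [pvBlockStep, pvHdrStep, ht, Bool.false_eq_true, if_false]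
  | cons h t =>
    have htail : ∀ x ∈ t, PySem.Str.startswith x "diff --git" = false := by
      intro x hx; exact hGB x (by simpa using hx)
    cases hh : PySem.Str.startswith h "diff --git" with
    | true =>
      rw [List.foldl_cons]
      by_cases hlen : 3 ≤ ((PySem.Str.split? h " ").getD []).length
      · rw [show pvStepA (d, c) h =
            ((if (d.contains (PySem.Str.slice (PySem.List.pyGetD ((PySem.Str.split? h " ").getD []) 2 "") (some 2) none)) then d
              else d.insert (PySem.Str.slice (PySem.List.pyGetD ((PySem.Str.split? h " ").getD []) 2 "") (some 2) none) PySem.Set.empty),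
             some (PySem.Str.slice (PySem.List.pyGetD ((PySem.Str.split? h " ").getD []) 2 "") (some 2) none)) from by
          simp only [pvStepA, hh, hlen, if_true]]
        rw [pvBodyScan t _ _ htail]
        simp only [pvBlockStep, pvHdrStep, hh, hlen, if_true]
        split <;> rfl
      · rw [show pvStepA (d, c) h = (d, c) from by
          simp only [pvStepA, hh, hlen, if_true, if_false]]
        rw [pvBodyScan t _ _ htail]
        simp only [pvBlockStep, pvHdrStep, hh, hlen, if_true, if_false]
        split <;> rfl
    | false =>
      have hall : ∀ x ∈ h :: t, PySem.Str.startswith x "diff --git" = false := by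
        intro x hx
        rcases List.mem_cons.mp hx with rfl | hx
        · exact hh
        · exact htail x hx
      rw [pvBodyScan (h :: t) d c hall]
      simp only [pvBlockStep, pvHdrStep, hh, Bool.false_eq_true, if_false]
      split <;> rfl

theorem pvMainFold (lines : List String) (bs : List (List String)) (cur : List String)
    (st : pvStA) (hGB : pvGB cur) :
    (((lines.foldl pvBuildStep (bs, cur)).1 ++ [(lines.foldl pvBuildStep (bs, cur)).2]).foldl
        pvBlockStep st)
      = lines.foldl pvStepA (pvBlockStep (bs.foldl pvBlockStep st) cur) := by
  induction lines generalizing bs cur st with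
  | nil => simp [List.foldl_append]
  | cons l rest ih =>
    by_cases hl : PySem.Str.startswith l "diff --git" = true
    · have hb : pvBuildStep (bs, cur) l = (bs ++ [cur], [l]) := by
        unfold pvBuildStep; rw [if_pos hl]
      rw [List.foldl_cons, hb, ih (bs ++ [cur]) [l] st (by intro x hx; simp at hx)]
      rw [List.foldl_cons, List.foldl_append]
      congr 1
      rw [List.foldl_cons, List.foldl_nil]
      rw [pvBlockStep_eq [l] _ (by intro x hx; simp at hx)]
      rw [List.foldl_cons, List.foldl_nil]
    · have hl' : PySem.Str.startswith l "diff --git" = false := by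
        simpa using hl
      have hb : pvBuildStep (bs, cur) l = (bs, cur ++ [l]) := by
        unfold pvBuildStep; rw [if_neg hl]
      have hGB' : pvGB (cur ++ [l]) := by
        intro x hx
        cases cur with
        | nil => simp at hx
        | cons a t =>
          simp only [List.cons_append, List.drop_succ_cons, List.drop_zero] at hx
          rcases List.mem_append.mp hx with hx | hx
          · exact hGB x (by simpa using hx)
          · simp at hx; subst hx; exact hl'
      rw [List.foldl_cons, hb, ih bs (cur ++ [l]) st hGB']
      rw [List.foldl_cons]
      congr 1
      rw [pvBlockStep_eq _ _ hGB', pvBlockStep_eq _ _ hGB, List.foldl_append]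
      rw [List.foldl_cons, List.foldl_nil]

-- ===== VERDICT (by name: the statement is the Claim_ definition above) =====
theorem parse_diff_spec : Claim_equal_parse_diff := by
  intro diff_text _
  unfold Spec_parse_diff
  simp only [parse_diff, parse_diff_alt]
  rw [pvMainFold _ [] [] (PySem.Dict.empty, none) (by intro x hx; simp at hx)]
  rfl
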